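-- pv_equiv track=rewrite | github.com/mohammedsuhail364/LeetCode | 1784-check-if-binary-string-has-at-most-one-segment-of-ones/1784-check-if-binary-string-has-at-most-one-segment-of-ones.py | checkOnesSegment
-- ===== SOURCE A (Python) =====
-- def checkOnesSegment(s: str) -> bool:
--     i=0
--     index=set()
--
--     while i<len(s) and s[i]=='1':
--         i+=1
--     for x in range(i,len(s)):
--         if s[x]=='1':
--             return False
--     return True
-- ===== SOURCE B (Python) =====
-- def checkOnesSegment(s: str) -> bool:
--     # True iff all the ones in s form a prefix: the first s.count('1')
--     # characters must themselves all be '1'.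
--     return s.startswith('1' * s.count('1'))
-- ===== Notes on version B (the rewrite author's own statement) =====
-- stated objective: idiomatic
-- what changed: Replaces A's two-phase manual scan (a while loop skipping the leading ones, then an indexed loop looking for a later one) by a counting characterisation with no scan logic: count the ones, build the string of that many ones, and test it as a prefix - the ones form one leading segment iff the first count('1') characters are all '1'.
import Mathlib
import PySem

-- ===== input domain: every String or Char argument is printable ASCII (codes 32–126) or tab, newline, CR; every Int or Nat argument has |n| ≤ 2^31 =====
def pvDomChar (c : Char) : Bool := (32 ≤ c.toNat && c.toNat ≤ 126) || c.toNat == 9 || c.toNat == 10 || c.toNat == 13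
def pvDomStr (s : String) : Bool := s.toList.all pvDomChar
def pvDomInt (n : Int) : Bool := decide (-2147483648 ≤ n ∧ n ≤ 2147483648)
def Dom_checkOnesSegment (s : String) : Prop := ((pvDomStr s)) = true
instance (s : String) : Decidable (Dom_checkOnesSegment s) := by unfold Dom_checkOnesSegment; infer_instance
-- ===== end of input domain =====

-- B replaces A's two-phase manual scan by a counting characterisation: the ones form one leading
-- segment iff the first count('1') characters are all '1' (idiomatic; a timing run measured it
-- faster by a constant factor: library count/prefix test instead of per-index subscripting).

-- ===== PORT A =====
-- while i < len(s) and s[i] == '1': i += 1   (s[i] guarded by i < len, so getD is exact)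
def pvWhileA (cs : List Char) (i : Nat) : Nat :=
  if i < cs.length ∧ cs.getD i ' ' = '1' then pvWhileA cs (i + 1) else i
termination_by cs.length - i
decreasing_by omega

-- for x in range(i, len(s)): if s[x] == '1': return False / return True
def pvForA (cs : List Char) (x : Nat) : Bool :=
  if x < cs.length then
    (if cs.getD x ' ' = '1' then false else pvForA cs (x + 1))
  else true
termination_by cs.length - x
decreasing_by omega

def checkOnesSegment (s : String) : Bool :=
  pvForA s.toList (pvWhileA s.toList 0)

-- ===== PORT B =====
-- s.startswith('1' * s.count('1')); the string repetition '1' * k is ported by hand as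
-- String.ofList (List.replicate k '1'), which is exact (k copies of the character '1').
def checkOnesSegment_alt (s : String) : Bool :=
  PySem.Str.startswith s (String.ofList (List.replicate (PySem.Str.count s "1") '1'))

-- ===== PRECONDITION & SPEC =====
def Spec_checkOnesSegment (s : String) (out : Bool) : Prop := out = checkOnesSegment_alt s
instance (s : String) (out : Bool) : Decidable (Spec_checkOnesSegment s out) := by unfold Spec_checkOnesSegment; infer_instance

-- ===== CLAIM (what is proved, stated in full; the proofs are below) =====
def Claim_equal_checkOnesSegment : Prop := ∀ (s : String), Dom_checkOnesSegment s → Spec_checkOnesSegment s (checkOnesSegment s)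

-- ===== LEMMAS AND PROOFS =====

-- A's for-loop from index i is an 'all (≠ '1')' over the tail
theorem pvForA_eq (cs : List Char) (i : Nat) :
    pvForA cs i = (cs.drop i).all (fun c => !(c = '1')) := by
  fun_induction pvForA cs i with
  | case1 i h h1 =>
      have hg : cs.getD i ' ' = cs[i] := List.getD_eq_getElem cs ' ' h
      rw [hg] at h1
      rw [List.drop_eq_getElem_cons h, List.all_cons]
      simp [h1]
  | case2 i h h1 ih =>
      have hg : cs.getD i ' ' = cs[i] := List.getD_eq_getElem cs ' ' h
      rw [hg] at h1
      rw [List.drop_eq_getElem_cons h, List.all_cons, ih]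
      simp [h1]
  | case3 i h =>
      rw [List.drop_eq_nil_of_le (by omega)]
      simp

-- A's while-loop drops the leading run of '1'
theorem pvWhileA_eq (cs : List Char) (i : Nat) :
    cs.drop (pvWhileA cs i) = (cs.drop i).dropWhile (fun c => c = '1') := by
  fun_induction pvWhileA cs i with
  | case1 i h ih =>
      rw [List.drop_eq_getElem_cons h.1]
      have h1 : cs[i] = '1' := by
        have := h.2; rwa [List.getD_eq_getElem cs ' ' h.1] at this
      simp [h1, ih]
  | case2 i h =>
      rcases Nat.lt_or_ge i cs.length with hlt | hge
      · have h1 : ¬ cs[i] = '1' := by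
          intro hc
          exact h ⟨hlt, by rwa [List.getD_eq_getElem cs ' ' hlt]⟩
        rw [List.drop_eq_getElem_cons hlt, List.dropWhile_cons_of_neg (by simp [h1])]
      · rw [List.drop_eq_nil_of_le hge]
        simp

-- PySem's substring counter with the one-character pattern ['1'] is List.count '1'
theorem countGo_singleton (cs : List Char) (fuel acc : Nat) (h : cs.length ≤ fuel) :
    PySem.Chars.count.go ['1'] fuel cs acc = acc + cs.count '1' := by
  induction cs generalizing fuel acc with
  | nil => cases fuel <;> simp [PySem.Chars.count.go]
  | cons c t ih =>
      cases fuel with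
      | zero => simp at h
      | succ m =>
          simp only [List.length_cons] at h
          by_cases hc : c = '1'
          · have hp : List.isPrefixOf ['1'] (c :: t) = true := by
              simp [List.isPrefixOf, hc]
            simp only [PySem.Chars.count.go, hp, if_pos]
            rw [show List.drop (List.length ['1']) (c :: t) = t from rfl,
                ih m (acc + 1) (by omega)]
            simp [hc]
            omega
          · have h1c : ('1' : Char) ≠ c := fun h => hc h.symm
            have hp : List.isPrefixOf ['1'] (c :: t) = false := by
              simp [List.isPrefixOf, h1c]
            simp only [PySem.Chars.count.go, hp, Bool.false_eq_true, if_false]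
            rw [ih m acc (by omega)]
            simp [hc]

theorem count_one (cs : List Char) :
    PySem.Chars.count cs ['1'] = cs.count '1' := by
  have := countGo_singleton cs cs.length 0 (le_refl _)
  simpa [PySem.Chars.count] using this

-- all-non-one equals count-zero
theorem all_ne_one_iff_count_zero (t : List Char) :
    t.all (fun c => !(c = '1')) = (t.count '1' == 0) := by
  rcases h : t.count '1' with _ | k
  · have : '1' ∉ t := List.count_eq_zero.mp h
    simp only [beq_self_eq_true, List.all_eq_true]
    intro c hc
    simp only [Bool.not_eq_eq_eq_not, Bool.not_true, decide_eq_false_iff_not]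
    intro hc1; exact this (hc1 ▸ hc)
  · have h1 : '1' ∈ t := List.count_pos_iff.mp (by omega)
    rw [List.all_eq_false.mpr ⟨'1', h1, by simp⟩]
    simp

-- the key characterisation: no '1' after the leading run of ones  ⟺  the first
-- (count '1') characters are all '1'
theorem key (cs : List Char) :
    ((cs.dropWhile (fun c => c = '1')).all (fun c => !(c = '1')))
      = (List.replicate (cs.count '1') '1').isPrefixOf cs := by
  induction cs with
  | nil => rfl
  | cons c t ih =>
      by_cases hc : c = '1'
      · subst hc
        rw [List.dropWhile_cons_of_pos (by simp), ih]
        simp [List.replicate_succ]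
      · rw [List.dropWhile_cons_of_neg (by simp [hc])]
        rw [List.count_cons, if_neg (by simp [hc]), Nat.add_zero]
        rcases h : t.count '1' with _ | k
        · rw [List.replicate_zero, List.all_cons, all_ne_one_iff_count_zero t, h]
          simp [hc, List.isPrefixOf]
        · rw [List.replicate_succ]
          have h1c : ('1' : Char) ≠ c := fun h => hc h.symm
          have hpfx : List.isPrefixOf ('1' :: List.replicate k '1') (c :: t) = false := by
            simp [List.isPrefixOf, h1c]
          rw [hpfx, List.all_cons, all_ne_one_iff_count_zero t, h]
          simp [hc]

-- ===== VERDICT (by name: the statement is the Claim_ definition above) =====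
theorem checkOnesSegment_spec : Claim_equal_checkOnesSegment := by
  intro s _
  unfold Spec_checkOnesSegment checkOnesSegment checkOnesSegment_alt
  rw [pvForA_eq, pvWhileA_eq, List.drop_zero, key,
      PySem.Str.startswith_eq, PySem.Str.count_eq]
  simp only [PySem.Chars.startswith, String.toList_ofList,
    show ("1" : String).toList = ['1'] from rfl, count_one]
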